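-- pv_equiv track=rewrite | github.com/test-reports/rapidfort-ui-tests | scripts/generate_dashboard.py | infer_test_type
-- ===== SOURCE A (Python) =====
-- def infer_test_type(results):
--     test_types = {
--         result["classname"].replace("tests.test_", "").replace("tests.", "")
--         for result in results
--         if result.get("classname")
--     }
--     if len(test_types) == 1:
--         return next(iter(test_types))
--     return "full_suite"
-- ===== SOURCE B (Python) =====
-- def infer_test_type(results):
--     candidate = None
--     for result in results:
--         name = result.get("classname")
--         if not name:
--             continue
--         t = name.replace("tests.test_", "").replace("tests.", "")
--         if candidate is None:
--             candidate = t
--         elif t != candidate: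
--             return "full_suite"
--     return candidate if candidate is not None else "full_suite"
-- ===== Notes on version B (the rewrite author's own statement) =====
-- stated objective: alternative
-- what changed: Replaces the set comprehension plus length check with a single pass that keeps one scalar candidate and returns 'full_suite' early as soon as a second distinct transformed classname is seen.
import Mathlib
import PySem

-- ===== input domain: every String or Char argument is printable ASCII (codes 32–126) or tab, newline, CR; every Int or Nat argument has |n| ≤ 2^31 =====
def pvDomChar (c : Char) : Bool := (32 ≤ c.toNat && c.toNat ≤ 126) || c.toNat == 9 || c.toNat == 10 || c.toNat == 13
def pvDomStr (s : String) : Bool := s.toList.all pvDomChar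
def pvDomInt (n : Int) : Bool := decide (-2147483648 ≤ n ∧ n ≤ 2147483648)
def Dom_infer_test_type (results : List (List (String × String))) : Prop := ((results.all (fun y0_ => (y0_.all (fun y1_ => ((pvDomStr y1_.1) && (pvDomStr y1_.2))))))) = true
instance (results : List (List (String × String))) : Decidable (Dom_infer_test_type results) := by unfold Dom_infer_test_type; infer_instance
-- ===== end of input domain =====

-- B replaces A's set comprehension + length check by a single pass keeping one scalar
-- candidate with an early exit on the second distinct transformed classname (alternative decomposition).


-- ===== PORT A =====
-- shared with B: result["classname"].replace("tests.test_", "").replace("tests.", "")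
def pvTransform (s : String) : String :=
  PySem.Str.replace (PySem.Str.replace s "tests.test_" "") "tests." ""

-- result.get("classname") on the association list (first match)
def pvClassname (r : List (String × String)) : Option String :=
  PySem.Dict.get? (PySem.Dict.mk r) "classname"

-- one step of A's set comprehension
def pvStep (acc : PySem.Set String) (r : List (String × String)) : PySem.Set String :=
  match pvClassname r with
  | some s => if s ≠ "" then PySem.Set.add acc (pvTransform s) else acc
  | none => acc

def infer_test_type (results : List (List (String × String))) : String :=
  let test_types : PySem.Set String := results.foldl pvStep PySem.Set.empty
  match test_types with
  | [t] => t            -- len == 1: next(iter(test_types))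
  | _ => "full_suite"

-- ===== PORT B =====
def pvAltGo (cand : Option String) (rs : List (List (String × String))) : String :=
  match rs with
  | [] => match cand with | some c => c | none => "full_suite"
  | r :: rest =>
    match pvClassname r with
    | none => pvAltGo cand rest
    | some s =>
      if s = "" then pvAltGo cand rest
      else
        let t := pvTransform s
        match cand with
        | none => pvAltGo (some t) rest
        | some c => if t = c then pvAltGo cand rest else "full_suite"

def infer_test_type_alt (results : List (List (String × String))) : String :=
  pvAltGo none results

-- ===== PRECONDITION & SPEC =====
def Spec_infer_test_type (results : List (List (String × String))) (out : String) : Prop := out = infer_test_type_alt results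
instance (results : List (List (String × String))) (out : String) : Decidable (Spec_infer_test_type results out) := by unfold Spec_infer_test_type; infer_instance

-- ===== CLAIM (what is proved, stated in full; the proofs are below) =====
def Claim_equal_infer_test_type : Prop := ∀ (results : List (List (String × String))), Dom_infer_test_type results → Spec_infer_test_type results (infer_test_type results)

-- ===== LEMMAS AND PROOFS =====
def pvFinish (tt : List String) : String :=
  match tt with
  | [t] => t
  | _ => "full_suite"

theorem pvStep_length_le (acc : PySem.Set String) (r : List (String × String)) :
    acc.length ≤ (pvStep acc r).length := by
  unfold pvStep
  cases pvClassname r with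
  | none => exact le_refl _
  | some s =>
    by_cases h : s = "" <;> simp [h, PySem.Set.add]
    split <;> simp

theorem pvFinish_big (rs : List (List (String × String))) (acc : PySem.Set String)
    (h : 2 ≤ acc.length) : pvFinish (rs.foldl pvStep acc) = "full_suite" := by
  induction rs generalizing acc with
  | nil =>
    unfold pvFinish
    match acc, h with
    | a :: b :: rest, _ => rfl
  | cons r rest ih =>
    simp only [List.foldl_cons]
    exact ih _ (le_trans h (pvStep_length_le acc r))

theorem pvAltGo_some (rs : List (List (String × String))) (c : String) :
    pvAltGo (some c) rs = pvFinish (rs.foldl pvStep [c]) := by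
  induction rs generalizing c with
  | nil => rfl
  | cons r rest ih =>
    simp only [pvAltGo, List.foldl_cons]
    cases hc : pvClassname r with
    | none => simp only [pvStep, hc]; exact ih c
    | some s =>
      dsimp only
      by_cases hs : s = ""
      · rw [if_pos hs]
        simp only [pvStep, hc, if_neg (show ¬(s ≠ "") from fun hn => hn hs)]
        exact ih c
      · rw [if_neg hs]
        simp only [pvStep, hc, if_pos hs]
        by_cases ht : pvTransform s = c
        · simp only [PySem.Set.add, PySem.Set.contains, ht,
            List.contains_cons, BEq.rfl, Bool.true_or, if_pos, if_pos ht]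
          exact ih c
        · simp only [if_neg ht]
          have hadd : PySem.Set.add [c] (pvTransform s) = [c, pvTransform s] := by
            simp [PySem.Set.add, PySem.Set.contains, ht]
          rw [hadd]
          exact (pvFinish_big rest [c, pvTransform s] (by simp)).symm

theorem pvAltGo_none (rs : List (List (String × String))) :
    pvAltGo none rs = pvFinish (rs.foldl pvStep PySem.Set.empty) := by
  induction rs with
  | nil => rfl
  | cons r rest ih =>
    simp only [pvAltGo, List.foldl_cons]
    cases hc : pvClassname r with
    | none => simp only [pvStep, hc]; exact ih
    | some s =>
      dsimp only
      by_cases hs : s = ""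
      · rw [if_pos hs]
        simp only [pvStep, hc, if_neg (show ¬(s ≠ "") from fun hn => hn hs)]
        exact ih
      · rw [if_neg hs]
        simp only [pvStep, hc, if_pos hs]
        have hadd : PySem.Set.add PySem.Set.empty (pvTransform s) = [pvTransform s] := by
          simp [PySem.Set.add, PySem.Set.contains, PySem.Set.empty]
        rw [hadd]
        exact pvAltGo_some rest (pvTransform s)

-- ===== VERDICT (by name: the statement is the Claim_ definition above) =====
theorem infer_test_type_spec : Claim_equal_infer_test_type := by
  intro results _
  unfold Spec_infer_test_type infer_test_type infer_test_type_alt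
  rw [pvAltGo_none]
  rfl
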